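-- pv_equiv track=rewrite | github.com/Lucynn/SQLRabbit | modify.py | whiteSpaceBypassWithParenthesis
-- ===== SOURCE A (Python) =====
-- def whiteSpaceBypassWithParenthesis(payloads):
--     arr = []
--     for payload in payloads:
--         x = ""
--         i = 0
--         while i < len(payload):
--             if payload[i].isdigit():
--                 x += "(" + payload[i] + ")"
--             elif payload[i] == "=":
--                 x += "(=)"
--             elif payload[i] == " ":
--                 x += ""
--             else:
--                 x += payload[i]
--             i += 1
--         arr.append(x)
--     return arr
-- ===== SOURCE B (Python) =====
-- def whiteSpaceBypassWithParenthesis(payloads):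
--     out = []
--     for payload in payloads:
--         s = payload.replace(" ", "")
--         for ch in "0123456789=":
--             s = s.replace(ch, "(" + ch + ")")
--         out.append(s)
--     return out
-- ===== Notes on version B (the rewrite author's own statement) =====
-- stated objective: alternative
-- what changed: Replaces A's single index-driven per-character while loop with its if/elif chain by staged whole-string passes: one str.replace deletes spaces, then eleven str.replace passes (one per digit and '='), wrapping each target in parentheses; correct because no replacement output contains a later pass's target.
import Mathlib
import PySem

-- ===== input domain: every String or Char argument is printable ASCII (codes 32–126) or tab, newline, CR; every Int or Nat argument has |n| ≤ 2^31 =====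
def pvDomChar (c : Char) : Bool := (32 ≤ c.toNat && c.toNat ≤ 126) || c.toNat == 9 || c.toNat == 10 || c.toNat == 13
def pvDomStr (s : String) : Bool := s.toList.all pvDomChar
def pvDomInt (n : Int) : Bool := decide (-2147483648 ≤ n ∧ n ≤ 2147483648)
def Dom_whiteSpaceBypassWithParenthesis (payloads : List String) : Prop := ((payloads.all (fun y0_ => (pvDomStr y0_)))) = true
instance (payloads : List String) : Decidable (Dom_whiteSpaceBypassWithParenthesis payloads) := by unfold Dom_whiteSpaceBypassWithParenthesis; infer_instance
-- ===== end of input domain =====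

-- B replaces A's single per-character index loop (if/elif chain, x += …) by staged
-- whole-string str.replace passes: delete spaces, then one pass per digit and '='.

-- ===== PORT A =====
-- A's inner while loop over index i, building x by += in branch order
-- (digit / '=' / ' ' / other); recursion over the remaining characters carries the state x.
def pvA_loop (x : List Char) (rest : List Char) : List Char :=
  match rest with
  | [] => x
  | c :: cs =>
    if PySem.Chars.isdigit c then pvA_loop (x ++ ['('] ++ [c] ++ [')']) cs
    else if c = '=' then pvA_loop (x ++ ['(', '=', ')']) cs
    else if c = ' ' then pvA_loop (x ++ []) cs
    else pvA_loop (x ++ [c]) cs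

def whiteSpaceBypassWithParenthesis (payloads : List String) : List String :=
  payloads.foldl (fun arr payload => arr ++ [String.ofList (pvA_loop [] payload.toList)]) []

-- ===== PORT B =====
-- B: s = payload.replace(" ", ""); then for ch in "0123456789=": s = s.replace(ch, "(" + ch + ")").
def whiteSpaceBypassWithParenthesis_alt (payloads : List String) : List String :=
  payloads.foldl (fun out payload =>
    out ++ ["0123456789=".toList.foldl
      (fun s ch => PySem.Str.replace s (String.ofList [ch]) (String.ofList ['(', ch, ')']))
      (PySem.Str.replace payload " " "")]) []

-- ===== PRECONDITION & SPEC =====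
def Spec_whiteSpaceBypassWithParenthesis (payloads : List String) (out : List String) : Prop := out = whiteSpaceBypassWithParenthesis_alt payloads
instance (payloads : List String) (out : List String) : Decidable (Spec_whiteSpaceBypassWithParenthesis payloads out) := by unfold Spec_whiteSpaceBypassWithParenthesis; infer_instance

-- ===== CLAIM (what is proved, stated in full; the proofs are below) =====
def Claim_equal_whiteSpaceBypassWithParenthesis : Prop := ∀ (payloads : List String), Dom_whiteSpaceBypassWithParenthesis payloads → Spec_whiteSpaceBypassWithParenthesis payloads (whiteSpaceBypassWithParenthesis payloads)

-- ===== LEMMAS AND PROOFS =====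

-- A's per-character action.
def pvStep (c : Char) : List Char :=
  if PySem.Chars.isdigit c then ['(', c, ')']
  else if c = '=' then ['(', '=', ')']
  else if c = ' ' then []
  else [c]

-- single-character substitution (what one replace pass does per character)
def pvSubst (c : Char) (new : List Char) (x : Char) : List Char :=
  if x = c then new else [x]

-- replace.go on a one-character pattern, with enough fuel, is a flatMap
theorem pvGo_single (c : Char) (new : List Char) :
    ∀ (l : List Char) (fuel : Nat) (acc : List Char), l.length ≤ fuel →
      PySem.Chars.replace.go [c] new fuel l acc = acc.reverse ++ l.flatMap (pvSubst c new) := by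
  intro l
  induction l with
  | nil =>
    intro fuel acc _
    cases fuel <;> simp [PySem.Chars.replace.go]
  | cons x t ih =>
    intro fuel acc h
    cases fuel with
    | zero => simp at h
    | succ f =>
      have ht : t.length ≤ f := by simpa using h
      rw [PySem.Chars.replace.go]
      by_cases hx : x = c
      · have hp : [c].isPrefixOf (x :: t) = true := by simp [List.isPrefixOf, hx]
        rw [hp]
        simp only [if_true, List.length_cons, List.length_nil, List.drop_succ_cons,
          List.drop_zero]
        rw [ih f _ ht]
        simp [pvSubst, hx]
      · have hp : [c].isPrefixOf (x :: t) = false := by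
          simp only [List.isPrefixOf, Bool.and_true,
            beq_eq_false_iff_ne]
          exact fun hcx => hx hcx.symm
        rw [hp]
        simp only [Bool.false_eq_true, if_false]
        rw [ih f _ ht]
        simp [pvSubst, hx]

-- replace on a one-character pattern is a flatMap
theorem pvReplace_single (c : Char) (new l : List Char) :
    PySem.Chars.replace l [c] new = l.flatMap (pvSubst c new) := by
  rw [PySem.Chars.replace]
  simp only [List.isEmpty_cons, Bool.false_eq_true, if_false]
  simpa using pvGo_single c new l l.length [] le_rfl

-- the composed per-character action of B's twelve passes equals A's branch chain
theorem pvComposed_eq (c : Char) :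
    ((((((((((((pvSubst ' ' [] c).flatMap (pvSubst '0' ['(', '0', ')'])).flatMap
      (pvSubst '1' ['(', '1', ')'])).flatMap (pvSubst '2' ['(', '2', ')'])).flatMap
      (pvSubst '3' ['(', '3', ')'])).flatMap (pvSubst '4' ['(', '4', ')'])).flatMap
      (pvSubst '5' ['(', '5', ')'])).flatMap (pvSubst '6' ['(', '6', ')'])).flatMap
      (pvSubst '7' ['(', '7', ')'])).flatMap (pvSubst '8' ['(', '8', ')'])).flatMap
      (pvSubst '9' ['(', '9', ')'])).flatMap (pvSubst '=' ['(', '=', ')'])) = pvStep c := by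
  by_cases hd : PySem.Chars.isdigit c
  · have hdd : '0' ≤ c ∧ c ≤ '9' := by simpa [PySem.Chars.isdigit] using hd
    rw [Char.le_def, UInt32.le_iff_toNat_le] at hdd
    have h1 : 48 ≤ c.toNat := hdd.1
    have h2 : c.toNat ≤ 57 := by
      have := hdd.2; rw [Char.le_def, UInt32.le_iff_toNat_le] at this; exact this
    interval_cases h : c.toNat <;>
      · rw [show c = Char.ofNat c.toNat by rw [Char.ofNat_toNat], h]; decide
  · by_cases he : c = '='
    · subst he; decide
    · by_cases hs : c = ' '
      · subst hs; decide
      · have hne : ∀ d : Char, PySem.Chars.isdigit d → c ≠ d := by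
          intro d hdd hcd; exact hd (hcd ▸ hdd)
        simp [pvSubst, pvStep, hd, he, hs,
          hne '0' (by decide), hne '1' (by decide), hne '2' (by decide), hne '3' (by decide),
          hne '4' (by decide), hne '5' (by decide), hne '6' (by decide), hne '7' (by decide),
          hne '8' (by decide), hne '9' (by decide)]

-- B's twelve staged passes over one payload collapse to one flatMap of pvStep
theorem pvB_payload_eq (l : List Char) :
    "0123456789=".toList.foldl
      (fun s ch => PySem.Chars.replace s [ch] ['(', ch, ')'])
      (PySem.Chars.replace l [' '] []) = l.flatMap pvStep := by
  show List.foldl _ _ _ = _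
  simp only [show "0123456789=".toList =
    ['0','1','2','3','4','5','6','7','8','9','='] from rfl, List.foldl_cons, List.foldl_nil]
  simp only [pvReplace_single, List.flatMap_assoc]
  exact List.flatMap_congr (fun c _ => by
    simpa only [List.flatMap_assoc] using pvComposed_eq c)

-- A's loop is the flatMap of pvStep, run behind the accumulator
theorem pvA_loop_eq (cs : List Char) (x : List Char) :
    pvA_loop x cs = x ++ cs.flatMap pvStep := by
  induction cs generalizing x with
  | nil => simp [pvA_loop]
  | cons c cs ih =>
    rw [pvA_loop, List.flatMap_cons]
    split_ifs with hd he hs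
    · rw [ih]; simp [pvStep, hd]
    · rw [ih]; simp [pvStep, he]
    · rw [ih]; simp [pvStep, hs, PySem.Chars.isdigit]
    · rw [ih]; simp [pvStep, hd, he, hs]

-- ===== VERDICT (by name: the statement is the Claim_ definition above) =====
theorem whiteSpaceBypassWithParenthesis_spec : Claim_equal_whiteSpaceBypassWithParenthesis := by
  intro payloads _
  show _ = _
  unfold whiteSpaceBypassWithParenthesis whiteSpaceBypassWithParenthesis_alt
  rw [PySem.List.foldl_append_singleton_eq_map, PySem.List.foldl_append_singleton_eq_map]
  simp only [List.nil_append]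
  refine List.map_congr_left ?_
  intro p _
  rw [pvA_loop_eq, List.nil_append, ← pvB_payload_eq p.toList]
  simp [PySem.Str.replace]
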